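-- pv_equiv track=rewrite | github.com/malachi-hale/python-exercises | import_exercises.py | find_max_fruit_types
-- ===== SOURCE A (Python) =====
-- def find_max_fruit_types(my_file):
--     fruit_types = dict()
--     for my_user in my_file:
--         if my_user["favoriteFruit"] in fruit_types.keys():
--             fruit_types[my_user["favoriteFruit"]] += 1
--         else:
--             fruit_types[my_user["favoriteFruit"]] = 1
--     return max(fruit_types)
-- ===== SOURCE B (Python) =====
-- def find_max_fruit_types(my_file):
--     best = None
--     for my_user in my_file:
--         fruit = my_user["favoriteFruit"]
--         if best is None or best < fruit:
--             best = fruit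
--     if best is None:
--         raise ValueError("max() arg is an empty sequence")
--     return best
-- ===== Notes on version B (the rewrite author's own statement) =====
-- stated objective: simpler
-- what changed: B drops A's key-count dictionary entirely and threads a single running-max string through one loop, since only the lexicographically largest fruit name is ever returned.
import Mathlib
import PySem

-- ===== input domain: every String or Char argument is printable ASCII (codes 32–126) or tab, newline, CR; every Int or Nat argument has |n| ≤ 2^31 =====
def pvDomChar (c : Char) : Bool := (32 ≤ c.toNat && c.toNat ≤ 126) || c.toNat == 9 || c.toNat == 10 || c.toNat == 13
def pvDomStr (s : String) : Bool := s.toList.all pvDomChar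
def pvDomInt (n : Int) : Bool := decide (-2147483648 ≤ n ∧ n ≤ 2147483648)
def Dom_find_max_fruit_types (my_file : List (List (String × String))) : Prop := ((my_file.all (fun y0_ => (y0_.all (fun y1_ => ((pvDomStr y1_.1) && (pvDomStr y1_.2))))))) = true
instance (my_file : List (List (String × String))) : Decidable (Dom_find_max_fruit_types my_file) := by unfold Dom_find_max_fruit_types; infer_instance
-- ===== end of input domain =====

-- B replaces A's (unused) per-fruit count dictionary with a single running-max pass; return value proved equal on nonempty inputs whose users all carry "favoriteFruit".


-- ===== PORT A =====
-- my_user["favoriteFruit"]: a Python dict arrives as an assoc list (last duplicate wins, as in dict(...)); KeyError is excluded by Pre_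
def pvFav (u : List (String × String)) : String :=
  (PySem.Dict.ofList u).getD "favoriteFruit" ""

def find_max_fruit_types (my_file : List (List (String × String))) : String :=
  let fruit_types :=
    my_file.foldl (fun d my_user =>
      let f := pvFav my_user
      if d.contains f then d.insert f (d.getD f 0 + 1)
      else d.insert f (1 : Int)) PySem.Dict.empty
  (PySem.List.max? fruit_types.keys (fun y => y)).getD ""

-- ===== PORT B =====
def find_max_fruit_types_alt (my_file : List (List (String × String))) : String :=
  (my_file.foldl (fun best my_user =>
      let fruit := pvFav my_user
      match best with
      | none => some fruit
      | some b => if b < fruit then some fruit else some b)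
    (none : Option String)).getD ""

-- ===== PRECONDITION & SPEC =====
-- Pre_: my_file nonempty (else Python's max raises ValueError) and every user has the key "favoriteFruit" (else KeyError)
def Pre_find_max_fruit_types (my_file : List (List (String × String))) : Prop :=
  my_file ≠ [] ∧ ∀ u ∈ my_file, (PySem.Dict.ofList u).contains "favoriteFruit" = true
instance (my_file : List (List (String × String))) : Decidable (Pre_find_max_fruit_types my_file) := by unfold Pre_find_max_fruit_types; infer_instance

def pvWitness_find_max_fruit_types : (List (List (String × String))) :=
  [[("favoriteFruit", "apple")], [("favoriteFruit", "banana"), ("name", "x")]]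

def Spec_find_max_fruit_types (my_file : List (List (String × String))) (out : String) : Prop := out = find_max_fruit_types_alt my_file
instance (my_file : List (List (String × String))) (out : String) : Decidable (Spec_find_max_fruit_types my_file out) := by unfold Spec_find_max_fruit_types; infer_instance

-- ===== CLAIM (what is proved, stated in full; the proofs are below) =====
def Claim_equal_find_max_fruit_types : Prop := ∀ (my_file : List (List (String × String))), Dom_find_max_fruit_types my_file → Pre_find_max_fruit_types my_file → Spec_find_max_fruit_types my_file (find_max_fruit_types my_file)

-- ===== LEMMAS AND PROOFS =====

-- A's two branches both insert at key (pvFav u): one insert with a conditional value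
lemma stepA_eq (d : PySem.Dict String Int) (u : List (String × String)) :
    (let f := pvFav u;
     if d.contains f then d.insert f (d.getD f 0 + 1) else d.insert f (1 : Int))
    = d.insert (pvFav u) (if d.contains (pvFav u) then d.getD (pvFav u) 0 + 1 else 1) := by
  by_cases h : d.contains (pvFav u) <;> simp [h]

lemma keysA (my_file : List (List (String × String))) :
    (my_file.foldl (fun d my_user =>
      if d.contains (pvFav my_user) then d.insert (pvFav my_user) (d.getD (pvFav my_user) 0 + 1)
      else d.insert (pvFav my_user) (1 : Int)) PySem.Dict.empty).keys
    = PySem.Set.ofList (my_file.map pvFav) := by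
  have h := PySem.List.foldl_congr_mem (l := my_file) (init := (PySem.Dict.empty : PySem.Dict String Int))
      (f := fun d my_user =>
        if d.contains (pvFav my_user) then d.insert (pvFav my_user) (d.getD (pvFav my_user) 0 + 1)
        else d.insert (pvFav my_user) (1 : Int))
      (g := fun d u =>
        d.insert (pvFav u) (if d.contains (pvFav u) then d.getD (pvFav u) 0 + 1 else 1))
      (fun acc x _ => stepA_eq acc x)
  rw [h, PySem.Dict.keys_foldl_insert_key]
  simp [PySem.Dict.keys_empty, PySem.Set.update_nil_left]

-- B's step on a some-accumulator is a running max
lemma if_lt_eq_max (b f : String) : (if b < f then some f else some b) = some (max b f) := by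
  rcases lt_or_ge b f with h | h
  · simp [h, max_eq_right h.le]
  · simp [not_lt.mpr h, max_eq_left h]

lemma foldB (l : List (List (String × String))) (b : String) :
    l.foldl (fun best my_user =>
      match best with
      | none => some (pvFav my_user)
      | some b => if b < pvFav my_user then some (pvFav my_user) else some b) (some b)
    = some ((l.map pvFav).foldl max b) := by
  induction l generalizing b with
  | nil => rfl
  | cons u t ih =>
    simp only [List.foldl_cons, List.map_cons]
    rw [show (if b < pvFav u then some (pvFav u) else some b) = some (max b (pvFav u)) from
      if_lt_eq_max b (pvFav u), ih]

-- max over the deduplicated fruit list equals max over the fruit list (ties are equal strings)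
lemma max_ofList_eq (xs : List String) (h : xs ≠ []) :
    PySem.List.max? (PySem.Set.ofList xs) (fun y => y) = PySem.List.max? xs (fun y => y) := by
  obtain ⟨m, hm⟩ : ∃ m, PySem.List.max? (PySem.Set.ofList xs) (fun y => y) = some m := by
    rcases Option.eq_none_or_eq_some (PySem.List.max? (PySem.Set.ofList xs) (fun y => y)) with h0 | hs
    · rw [PySem.List.max?_eq_none_iff] at h0
      rcases List.exists_mem_of_ne_nil xs h with ⟨x, hx⟩
      have : x ∈ PySem.Set.ofList xs := (PySem.Set.mem_ofList _ _).2 hx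
      simp [h0] at this
    · exact hs
  obtain ⟨m', hm'⟩ : ∃ m', PySem.List.max? xs (fun y => y) = some m' := by
    rcases Option.eq_none_or_eq_some (PySem.List.max? xs (fun y => y)) with h0 | hs
    · rw [PySem.List.max?_eq_none_iff] at h0; exact absurd h0 h
    · exact hs
  rw [hm, hm']
  have h1 : m ∈ xs := (PySem.Set.mem_ofList _ _).1 (PySem.List.max?_mem hm)
  have h2 : m' ∈ PySem.Set.ofList xs := (PySem.Set.mem_ofList _ _).2 (PySem.List.max?_mem hm')
  exact congrArg some (le_antisymm (PySem.List.max?_isMax hm' m h1) (PySem.List.max?_isMax hm m' h2))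

-- ===== VERDICT (by name: the statement is the Claim_ definition above) =====
theorem find_max_fruit_types_spec : Claim_equal_find_max_fruit_types := by
  intro my_file _ hpre
  unfold Spec_find_max_fruit_types find_max_fruit_types find_max_fruit_types_alt
  dsimp only []
  rcases my_file with _ | ⟨u, t⟩
  · exact absurd rfl hpre.1
  rw [keysA, max_ofList_eq _ (by simp), List.map_cons, PySem.List.max?_id_cons]
  simp only [List.foldl_cons, foldB, Option.getD_some]
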